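-- pv_equiv track=rewrite | github.com/shaharbr/library_transgenesis | unified_demultiplex.py | identify_sample_barcode
-- ===== SOURCE A (Python) =====
-- SAMPLE_BARCODES = {
--     'ACCTT', 'AATCG', 'AGAGA', 'CGGAG', 'CTACT', 'GAAAC',
--     'GCGCA', 'CCTGC', 'TAGGT', 'GTCGG', 'TTTAA', 'TGCCC'
-- }
--
-- def identify_sample_barcode(seq):
--     """
--     Identify sample barcode from first 5bp of read (for 6978 only)
--
--     Returns: sample_barcode or None or "AMBIGUOUS"
--     """
--     if len(seq) < 5:
--         return None
--
--     sample_bc = seq[0:5]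
--
--     # Check for N's
--     if 'N' in sample_bc:
--         return None
--
--     # Exact match
--     if sample_bc in SAMPLE_BARCODES:
--         return sample_bc
--
--     # Error correction: Hamming distance ≤1
--     matches = []
--     for valid_bc in SAMPLE_BARCODES:
--         mismatches = sum(1 for a, b in zip(sample_bc, valid_bc) if a != b)
--         if mismatches == 1:
--             matches.append(valid_bc)
--
--     if len(matches) == 1:
--         # Unique match - error correct
--         return matches[0]
--     elif len(matches) > 1:
--         # Ambiguous - multiple possible corrections
--         return "AMBIGUOUS"
--     else:
--         # No valid match within distance 1
--         return None
-- ===== SOURCE B (Python) =====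
-- SAMPLE_BARCODES = {
--     'ACCTT', 'AATCG', 'AGAGA', 'CGGAG', 'CTACT', 'GAAAC',
--     'GCGCA', 'CCTGC', 'TAGGT', 'GTCGG', 'TTTAA', 'TGCCC'
-- }
--
--
-- def identify_sample_barcode(seq):
--     """
--     Identify sample barcode from first 5bp of read (for 6978 only)
--
--     Returns: sample_barcode or None or "AMBIGUOUS"
--     """
--     if len(seq) < 5:
--         return None
--
--     sample_bc = seq[0:5]
--
--     if 'N' in sample_bc:
--         return None
--
--     if sample_bc in SAMPLE_BARCODES:
--         return sample_bc
--
--     # Instead of scanning all barcodes computing Hamming distances, generate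
--     # the <=20 single-substitution variants and probe the barcode set.
--     candidates = [sample_bc[:i] + b + sample_bc[i + 1:]
--                   for i in range(5) for b in 'ACGT' if b != sample_bc[i]]
--     matches = [c for c in candidates if c in SAMPLE_BARCODES]
--
--     if not matches:
--         return None
--     if len(matches) == 1:
--         return matches[0]
--     return "AMBIGUOUS"
-- ===== Notes on version B (the rewrite author's own statement) =====
-- stated objective: alternative
-- what changed: Instead of scanning every barcode and computing a Hamming mismatch count per barcode, B generates the <=20 single-position substitution variants of the 5bp prefix and probes the barcode set for each.
import Mathlib
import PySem

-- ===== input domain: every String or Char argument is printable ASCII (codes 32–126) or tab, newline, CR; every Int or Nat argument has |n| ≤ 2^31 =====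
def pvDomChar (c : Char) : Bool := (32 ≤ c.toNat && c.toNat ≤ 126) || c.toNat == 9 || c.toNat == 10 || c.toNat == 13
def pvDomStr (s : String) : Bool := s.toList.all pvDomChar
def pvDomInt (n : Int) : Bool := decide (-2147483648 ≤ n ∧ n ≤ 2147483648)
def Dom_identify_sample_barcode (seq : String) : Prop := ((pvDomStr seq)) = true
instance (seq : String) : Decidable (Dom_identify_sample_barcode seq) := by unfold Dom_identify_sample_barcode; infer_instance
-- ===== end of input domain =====

-- B replaces A's scan over all barcodes (computing a Hamming mismatch count for each) by
-- generating the ≤20 single-position substitution variants of the 5bp prefix and probing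
-- the barcode set for each; same return value everywhere (alternative algorithm, not timed faster).

-- ===== PORT A =====
-- the module-level set literal SAMPLE_BARCODES (all 12 elements distinct)
def pvBarcodes : List (List Char) :=
  PySem.Set.ofList ["ACCTT".toList, "AATCG".toList, "AGAGA".toList, "CGGAG".toList,
    "CTACT".toList, "GAAAC".toList, "GCGCA".toList, "CCTGC".toList,
    "TAGGT".toList, "GTCGG".toList, "TTTAA".toList, "TGCCC".toList]

-- A's match loop: for valid_bc in SAMPLE_BARCODES: mismatches = sum(1 for a,b in zip(...) if a != b); append if == 1
def pvMatchesA (sample_bc : List Char) : List (List Char) :=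
  pvBarcodes.foldl (fun acc valid_bc =>
    let mismatches : Int := (sample_bc.zip valid_bc).foldl
      (fun n p => if p.1 != p.2 then n + 1 else n) 0
    if mismatches = 1 then acc ++ [valid_bc] else acc) []

def identify_sample_barcode (seq : String) : Option String :=
  let cs := seq.toList
  if cs.length < 5 then none
  else
    let sample_bc := PySem.List.slice cs (some 0) (some 5)
    if PySem.Chars.isIn ['N'] sample_bc then none
    else if pvBarcodes.contains sample_bc then some (String.ofList sample_bc)
    else
      let ms := pvMatchesA sample_bc
      if ms.length = 1 then (PySem.List.pyGet? ms 0).map String.ofList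
      else if 1 < ms.length then some "AMBIGUOUS"
      else none

-- ===== PORT B =====
-- candidates = [bc[:i] + b + bc[i+1:] for i in range(5) for b in 'ACGT' if b != bc[i]];
-- matches = [c for c in candidates if c in SAMPLE_BARCODES]
-- (i is always in range, so bc[i] is ported as getD; bc[:i]/bc[i+1:] as take/drop, exact for 0 ≤ i)
def pvCands (bc : List Char) : List (List Char) :=
  ((List.range 5).flatMap (fun i =>
      ("ACGT".toList.filter (fun b => b != bc.getD i 'A')).map
        (fun b => bc.take i ++ b :: bc.drop (i+1)))).filter
    (fun c => pvBarcodes.contains c)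

def identify_sample_barcode_alt (seq : String) : Option String :=
  let cs := seq.toList
  if cs.length < 5 then none
  else
    let sample_bc := PySem.List.slice cs (some 0) (some 5)
    if PySem.Chars.isIn ['N'] sample_bc then none
    else if pvBarcodes.contains sample_bc then some (String.ofList sample_bc)
    else
      match pvCands sample_bc with
      | [] => none
      | [c] => some (String.ofList c)
      | _ => some "AMBIGUOUS"

-- ===== PRECONDITION & SPEC =====
def Spec_identify_sample_barcode (seq : String) (out : Option String) : Prop := out = identify_sample_barcode_alt seq
instance (seq : String) (out : Option String) : Decidable (Spec_identify_sample_barcode seq out) := by unfold Spec_identify_sample_barcode; infer_instance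

-- ===== CLAIM (what is proved, stated in full; the proofs are below) =====
def Claim_equal_identify_sample_barcode : Prop := ∀ (seq : String), Dom_identify_sample_barcode seq → Spec_identify_sample_barcode seq (identify_sample_barcode seq)

-- ===== LEMMAS AND PROOFS =====

-- A's match list: barcodes at Hamming distance exactly 1 from the prefix
def pvHam1 (bc : List Char) : List (List Char) :=
  pvBarcodes.filter (fun v => (bc.zip v).countP (fun p => p.1 != p.2) == 1)

lemma pvBarcodes_all : (pvBarcodes.all (fun y => y.length == 5 && y.all (fun c => "ACGT".toList.contains c))) = true := by rfl

lemma pvBarcodes_facts : ∀ y ∈ pvBarcodes, y.length = 5 ∧ ∀ c ∈ y, c ∈ "ACGT".toList := by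
  have h := pvBarcodes_all
  simp only [List.all_eq_true, Bool.and_eq_true, beq_iff_eq, List.contains_iff_mem] at h
  exact fun y hy => ⟨(h y hy).1, (h y hy).2⟩

lemma countP_zip_eq_zero_iff (s t : List Char) (h : s.length = t.length) :
    (s.zip t).countP (fun p => p.1 != p.2) = 0 ↔ s = t := by
  induction s generalizing t with
  | nil => cases t <;> simp_all
  | cons a s ih =>
    cases t with
    | nil => simp at h
    | cons b t =>
      have hlen : s.length = t.length := by simpa using h
      simp only [List.zip_cons_cons, List.countP_cons, List.cons.injEq]
      by_cases hab : a = b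
      · subst hab; simp [ih t hlen]
      · simp [hab]

lemma countP_zip_eq_one_iff (s t : List Char) (h : s.length = t.length) :
    (s.zip t).countP (fun p => p.1 != p.2) = 1 ↔
      ∃ u c d v, c ≠ d ∧ s = u ++ c :: v ∧ t = u ++ d :: v := by
  induction s generalizing t with
  | nil =>
    cases t with
    | nil =>
      simp only [List.zip_nil_left, List.countP_nil]
      constructor
      · omega
      · rintro ⟨u, c, d, v, _, hs, _⟩; exact absurd hs (by simp)
    | cons b t => simp at h
  | cons a s ih =>
    cases t with
    | nil => simp at h
    | cons b t =>
      have hlen : s.length = t.length := by simpa using h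
      simp only [List.zip_cons_cons, List.countP_cons]
      by_cases hab : a = b
      · subst hab
        simp only [bne_self_eq_false, Bool.false_eq_true, if_false, Nat.add_zero]
        rw [ih t hlen]
        constructor
        · rintro ⟨u, c, d, v, hcd, hs, ht⟩
          exact ⟨a :: u, c, d, v, hcd, by simp [hs], by simp [ht]⟩
        · rintro ⟨u, c, d, v, hcd, hs, ht⟩
          cases u with
          | nil =>
            simp only [List.nil_append, List.cons.injEq] at hs ht
            exact absurd (hs.1.symm.trans ht.1) hcd
          | cons x u =>
            simp only [List.cons_append, List.cons.injEq] at hs ht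
            exact ⟨u, c, d, v, hcd, hs.2, ht.2⟩
      · have hite : (if (a != b) = true then 1 else 0) = 1 := by simp [hab]
        rw [hite]
        constructor
        · intro hcnt
          have h0 : (s.zip t).countP (fun p => p.1 != p.2) = 0 := by omega
          have hst := (countP_zip_eq_zero_iff s t hlen).1 h0
          exact ⟨[], a, b, s, hab, by simp, by simp [hst]⟩
        · rintro ⟨u, c, d, v, hcd, hs, ht⟩
          cases u with
          | nil =>
            simp only [List.nil_append, List.cons.injEq] at hs ht
            have : s = t := hs.2.trans ht.2.symm
            rw [(countP_zip_eq_zero_iff s t hlen).2 this]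
          | cons x u =>
            simp only [List.cons_append, List.cons.injEq] at hs ht
            exact absurd (hs.1.trans ht.1.symm) hab

lemma mem_pvHam1 (bc : List Char) (x : List Char) :
    x ∈ pvHam1 bc ↔ x ∈ pvBarcodes ∧ (bc.zip x).countP (fun p => p.1 != p.2) = 1 := by
  simp [pvHam1]

lemma mem_pvCands (bc : List Char) (h5 : bc.length = 5) (x : List Char) :
    x ∈ pvCands bc ↔ x ∈ pvBarcodes ∧ (bc.zip x).countP (fun p => p.1 != p.2) = 1 := by
  have hx5 : x ∈ pvBarcodes → x.length = 5 := fun hx => (pvBarcodes_facts x hx).1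
  simp only [pvCands, List.mem_filter, List.mem_flatMap, List.mem_map, List.mem_range,
    List.elem_eq_contains.symm, List.elem_iff]
  constructor
  · rintro ⟨⟨i, hi, b, hb, rfl⟩, hxB⟩
    simp only [bne_iff_ne, ne_eq] at hb
    have hilt : i < bc.length := by omega
    refine ⟨hxB, (countP_zip_eq_one_iff _ _ ?_).2
      ⟨bc.take i, bc[i], b, bc.drop (i+1), ?_, ?_, rfl⟩⟩
    · have := hx5 hxB
      simp only [List.length_append, List.length_take, List.length_cons, List.length_drop] at this ⊢
      omega
    · exact fun hc => hb.2 (by rw [List.getD_eq_getElem bc 'A' hilt]; exact hc.symm)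
    · conv_lhs => rw [← List.set_getElem_self hilt,
        List.set_eq_take_append_cons_drop, if_pos hilt]
  · rintro ⟨hxB, hcnt⟩
    obtain ⟨u, c, d, v, hcd, hbc, hx⟩ := (countP_zip_eq_one_iff _ _ (by rw [h5, hx5 hxB])).1 hcnt
    have hu5 : u.length < 5 := by
      rw [hbc] at h5; simp only [List.length_append, List.length_cons] at h5; omega
    refine ⟨⟨u.length, hu5, d, ?_, ?_⟩, hxB⟩
    · simp only [bne_iff_ne, ne_eq]
      refine ⟨(pvBarcodes_facts x hxB).2 d (by rw [hx]; exact List.mem_append_right _ (List.mem_cons_self)), ?_⟩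
      have hgd : bc.getD u.length 'A' = c := by
        rw [hbc, List.getD_eq_getElem _ 'A' (by simp),
          List.getElem_append_right (Nat.le_refl _)]
        simp
      rw [hgd]; exact fun h => hcd h.symm
    · rw [hbc, List.take_left, hx]
      congr 1
      simp

set_option maxRecDepth 2048 in
lemma nodup_pvBarcodes : pvBarcodes.Nodup := by decide

lemma nodup_pvHam1 (bc : List Char) : (pvHam1 bc).Nodup :=
  List.Nodup.filter _ nodup_pvBarcodes

lemma nodup_pvCands (bc : List Char) (h5 : bc.length = 5) : (pvCands bc).Nodup := by
  apply List.Nodup.filter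
  rw [List.nodup_flatMap]
  constructor
  · intro i _
    refine List.Nodup.map ?_ (List.Nodup.filter _ (by decide))
    intro b b' he
    have := List.append_cancel_left he
    simpa using this
  · rw [List.pairwise_iff_getElem]
    intro a b ha hb hab
    simp only [List.length_range] at ha hb
    simp only [List.getElem_range]
    intro y hy1 hy2
    simp only [List.mem_map, List.mem_filter, bne_iff_ne, ne_eq] at hy1 hy2
    obtain ⟨c, hc, rfl⟩ := hy1
    obtain ⟨c', hc', he⟩ := hy2
    have hilen : a < bc.length := by omega
    have hlt1 : (bc.take a).length = a := by simp [h5]; omega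
    have hlen1 : a < (bc.take a ++ c :: bc.drop (a+1)).length := by
      simp [h5]; omega
    have h1 : (bc.take a ++ c :: bc.drop (a+1))[a]'hlen1 = c := by
      rw [List.getElem_append_right (by omega : (bc.take a).length ≤ a)]
      simp [hlt1]
    have hlen2 : a < (bc.take b ++ c' :: bc.drop (b+1)).length := he ▸ hlen1
    have h2 : (bc.take b ++ c' :: bc.drop (b+1))[a]'hlen2 = bc[a] := by
      rw [List.getElem_append_left (by simp [h5]; omega), List.getElem_take]
    have h3 : (bc.take b ++ c' :: bc.drop (b+1))[a]'hlen2
        = (bc.take a ++ c :: bc.drop (a+1))[a]'hlen1 := List.getElem_of_eq he _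
    exact hc.2 (by rw [List.getD_eq_getElem bc 'A' hilen, ← h2, h3, h1])

lemma perm_pvHam1_pvCands (bc : List Char) (h5 : bc.length = 5) :
    (pvHam1 bc).Perm (pvCands bc) := by
  rw [List.perm_ext_iff_of_nodup (nodup_pvHam1 bc) (nodup_pvCands bc h5)]
  intro x
  rw [mem_pvHam1, mem_pvCands bc h5]

lemma msA_eq (bc : List Char) : pvMatchesA bc = pvHam1 bc := by
  unfold pvMatchesA
  simp only [PySem.List.foldl_count_if]
  rw [PySem.List.foldl_append_ite_eq_filter
    (fun v => (0 : Int) + (((bc.zip v).countP (fun p => p.1 != p.2) : Nat) : Int) = 1)]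
  rw [List.nil_append, pvHam1]
  apply List.filter_congr
  intro v _
  rw [Bool.eq_iff_iff, decide_eq_true_iff, beq_iff_eq]
  omega

lemma tails_eq (bc : List Char) (h5 : bc.length = 5) :
    (if (pvMatchesA bc).length = 1 then (PySem.List.pyGet? (pvMatchesA bc) 0).map String.ofList
     else if 1 < (pvMatchesA bc).length then some "AMBIGUOUS" else none)
    = (match pvCands bc with
       | [] => none
       | [c] => some (String.ofList c)
       | _ => some "AMBIGUOUS") := by
  rw [msA_eq]
  have hperm := perm_pvHam1_pvCands bc h5
  rcases hc : pvCands bc with _ | ⟨c, _ | ⟨c', t⟩⟩ <;> rw [hc] at hperm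
  · rw [hperm.eq_nil]
    simp
  · rw [List.perm_singleton.1 hperm]
    simp [PySem.List.pyGet?, PySem.List.pyIdx?]
  · have hlen := hperm.length_eq
    simp only [List.length_cons] at hlen
    rw [if_neg (by omega), if_pos (by omega)]

-- ===== VERDICT (by name: the statement is the Claim_ definition above) =====
theorem identify_sample_barcode_spec : Claim_equal_identify_sample_barcode := by
  intro seq _
  show identify_sample_barcode seq = identify_sample_barcode_alt seq
  simp only [identify_sample_barcode, identify_sample_barcode_alt]
  by_cases h1 : seq.toList.length < 5
  · simp only [if_pos h1]
  · simp only [if_neg h1]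
    have h5 : (PySem.List.slice seq.toList (some 0) (some 5)).length = 5 := by
      rw [PySem.List.slice_toNat seq.toList (by norm_num) (by norm_num)]
      have h1' : ¬ seq.length < 5 := by simpa using h1
      simp only [List.length_take, List.length_drop]
      norm_num
      omega
    by_cases h2 : PySem.Chars.isIn ['N'] (PySem.List.slice seq.toList (some 0) (some 5)) = true
    · simp only [if_pos h2]
    · simp only [if_neg h2]
      by_cases h3 : pvBarcodes.contains (PySem.List.slice seq.toList (some 0) (some 5)) = true
      · simp only [if_pos h3]
      · simp only [if_neg h3]
        exact tails_eq _ h5
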